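-- pv_equiv track=rewrite | github.com/Filkoss/algoritmizace | 18.4/lodicky2.py | compute_rating
-- ===== SOURCE A (Python) =====
-- def compute_rating(seating, n):
--     """
--     seating: list délky n (váha pasažéra nebo None).
--     Vrátí rating = (váha vpravo) - (váha vlevo).
--     - Pokud je n sudé, pravá = index >= n//2, levá = index < n//2.
--     - Pokud je n liché, pravá = index > n//2, levá = index < n//2.
--       (prostřední sedačka se nepočítá ani vpravo, ani vlevo).
--     """
--     mid = n // 2
--
--     left_sum = sum(x for i, x in enumerate(seating)
--                    if x is not None and i < mid)
--
--     # pravá strana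
--     if n % 2 == 0:
--         right_sum = sum(x for i, x in enumerate(seating)
--                         if x is not None and i >= mid)
--     else:
--         right_sum = sum(x for i, x in enumerate(seating)
--                         if x is not None and i > mid)
--
--     return right_sum - left_sum
-- ===== SOURCE B (Python) =====
-- def compute_rating(seating, n):
--     mid = n // 2
--     even = n % 2 == 0
--     rating = 0
--     for i, x in enumerate(seating):
--         if x is None:
--             continue
--         if i < mid:
--             rating -= x
--         elif i > mid:
--             rating += x
--         elif even:
--             rating += x
--     return rating
-- ===== Notes on version B (the rewrite author's own statement) =====
-- stated objective: simpler
-- what changed: Replaces A's two/three separate filtered sum comprehensions with one single-pass accumulator loop that decides each element's sign (left negative, right positive, middle seat counted only for even n).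
import Mathlib
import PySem

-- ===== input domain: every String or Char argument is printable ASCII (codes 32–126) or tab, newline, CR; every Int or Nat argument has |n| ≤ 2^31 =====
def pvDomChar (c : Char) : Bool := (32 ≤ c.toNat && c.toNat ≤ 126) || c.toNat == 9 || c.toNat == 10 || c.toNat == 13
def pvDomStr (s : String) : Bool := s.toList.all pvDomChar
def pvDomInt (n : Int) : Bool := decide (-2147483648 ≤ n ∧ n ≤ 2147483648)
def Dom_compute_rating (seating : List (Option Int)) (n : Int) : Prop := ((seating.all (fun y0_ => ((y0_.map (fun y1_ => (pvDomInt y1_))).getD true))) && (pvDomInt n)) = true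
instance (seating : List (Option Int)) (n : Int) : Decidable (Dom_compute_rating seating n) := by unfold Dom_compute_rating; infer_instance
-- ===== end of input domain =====

-- ===== PORT A =====
-- A's helper: sum(x for i, x in enumerate(seating) if x is not None and cond(i)) — a filtered
-- enumerate-sum, one recursive pass with the running index, exact on every input.
def pvSumIf (cond : Int → Bool) : Int → List (Option Int) → Int
  | _, [] => 0
  | i, none :: rest => pvSumIf cond (i + 1) rest
  | i, some x :: rest => (if cond i then x else 0) + pvSumIf cond (i + 1) rest

def compute_rating (seating : List (Option Int)) (n : Int) : Int :=
  let mid := PySem.Int.floordiv n 2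
  let left_sum := pvSumIf (fun i => decide (i < mid)) 0 seating
  let right_sum :=
    if PySem.Int.mod n 2 = 0 then pvSumIf (fun i => decide (i ≥ mid)) 0 seating
    else pvSumIf (fun i => decide (i > mid)) 0 seating
  right_sum - left_sum

-- ===== PORT B =====
-- B's single accumulator loop: one pass deciding each element's sign.
def pvLoopB (mid : Int) (even : Bool) : Int → Int → List (Option Int) → Int
  | _, acc, [] => acc
  | i, acc, none :: rest => pvLoopB mid even (i + 1) acc rest
  | i, acc, some x :: rest =>
      pvLoopB mid even (i + 1)
        (if i < mid then acc - x else if i > mid then acc + x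
         else if even then acc + x else acc) rest

def compute_rating_alt (seating : List (Option Int)) (n : Int) : Int :=
  pvLoopB (PySem.Int.floordiv n 2) (PySem.Int.mod n 2 = 0) 0 0 seating

-- ===== PRECONDITION & SPEC =====
def Spec_compute_rating (seating : List (Option Int)) (n : Int) (out : Int) : Prop := out = compute_rating_alt seating n
instance (seating : List (Option Int)) (n : Int) (out : Int) : Decidable (Spec_compute_rating seating n out) := by unfold Spec_compute_rating; infer_instance

-- ===== CLAIM (what is proved, stated in full; the proofs are below) =====
def Claim_equal_compute_rating : Prop := ∀ (seating : List (Option Int)) (n : Int), Dom_compute_rating seating n → Spec_compute_rating seating n (compute_rating seating n)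

-- ===== LEMMAS AND PROOFS =====
-- Loop invariant: B's single pass equals acc + (A's right sum from index i) - (A's left sum from index i).
theorem pvLoopB_eq (mid : Int) (even : Bool) (xs : List (Option Int)) :
    ∀ (i acc : Int), pvLoopB mid even i acc xs =
      acc + (if even then pvSumIf (fun j => decide (j ≥ mid)) i xs
             else pvSumIf (fun j => decide (j > mid)) i xs)
          - pvSumIf (fun j => decide (j < mid)) i xs := by
  induction xs with
  | nil => intro i acc; cases even <;> simp [pvLoopB, pvSumIf]
  | cons hd tl ih =>
    intro i acc
    cases hd with
    | none => simp [pvLoopB, pvSumIf, ih]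
    | some x =>
      simp only [pvLoopB, pvSumIf, ih]
      cases even <;> split_ifs <;> simp_all <;> omega

-- ===== VERDICT (by name: the statement is the Claim_ definition above) =====
theorem compute_rating_spec : Claim_equal_compute_rating := by
  intro seating n _
  unfold Spec_compute_rating compute_rating compute_rating_alt
  rw [pvLoopB_eq]
  by_cases h : PySem.Int.mod n 2 = 0 <;> simp [h]
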